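-- pv_equiv track=rewrite | github.com/xscchoux/Leetcode-Submissions | 544-Output Contest Matches.py | findContestMatch
-- ===== SOURCE A (Python) =====
-- def findContestMatch(n: int) -> str:
--     arr = [str(i) for i in range(1, n+1)]
--
--     while len(arr) > 1:
--         N = len(arr)
--         for i in range(N//2):
--             arr[i] = f"({arr[i]},{arr[N-i-1]})"
--             arr.pop()
--
--     return arr[0]
-- ===== SOURCE B (Python) =====
-- def findContestMatch(n: int) -> str:
--     def build(lst):
--         if len(lst) <= 1:
--             return lst[0]
--         N = len(lst)
--         nxt = [f"({lst[i]},{lst[N-1-i]})" for i in range(N // 2)]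
--         if N % 2 == 1:
--             nxt.append(lst[N // 2])
--         return build(nxt)
--
--     return build([str(i) for i in range(1, n + 1)])
-- ===== Notes on version B (the rewrite author's own statement) =====
-- stated objective: alternative
-- what changed: A mutates one list in place, overwriting arr[i] and popping the tail inside a while loop; B is a pure recursion that builds each next round as a fresh list comprehension (keeping the middle element of an odd round) and recurses on it.
import Mathlib
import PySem

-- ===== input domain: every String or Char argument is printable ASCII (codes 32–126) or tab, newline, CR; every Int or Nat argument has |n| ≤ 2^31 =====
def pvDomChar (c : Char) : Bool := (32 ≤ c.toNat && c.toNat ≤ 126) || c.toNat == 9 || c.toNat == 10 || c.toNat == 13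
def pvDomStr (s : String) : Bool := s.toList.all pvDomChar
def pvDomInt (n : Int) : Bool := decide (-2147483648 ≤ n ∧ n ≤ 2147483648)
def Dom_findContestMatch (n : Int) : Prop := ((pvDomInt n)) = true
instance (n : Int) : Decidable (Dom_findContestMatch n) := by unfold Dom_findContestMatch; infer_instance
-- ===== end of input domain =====

-- B replaces A's in-place mutate-and-pop while loop with a recursion over freshly built, progressively smaller round lists (alternative decomposition, same cost); B matches A's return value on every n ≥ 1.


-- ===== PORT A =====
def aStep (N : Int) (arr : List String) (i : Int) : List String :=
  (PySem.List.pySetD arr i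
    ("(" ++ PySem.List.pyGetD arr i "" ++ "," ++ PySem.List.pyGetD arr (N - i - 1) "" ++ ")")).dropLast
theorem aStep_length (N : Int) (arr : List String) (i : Int) :
    (aStep N arr i).length = arr.length - 1 := by
  simp [aStep, PySem.List.length_pySetD]
theorem foldl_aStep_length (N : Int) (r : List Int) (arr : List String) :
    (r.foldl (aStep N) arr).length = arr.length - r.length := by
  induction r generalizing arr with
  | nil => simp
  | cons i r ih => simp [List.foldl_cons, ih, aStep_length]; omega
def aRound (arr : List String) : List String :=
  (PySem.List.pyRange 0 (PySem.Int.floordiv (arr.length : Int) 2) 1).foldl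
    (aStep (arr.length : Int)) arr
theorem aRound_length (arr : List String) :
    (aRound arr).length = arr.length - arr.length / 2 := by
  have h2 : PySem.Int.floordiv ((arr.length : Nat) : Int) 2 = ((arr.length / 2 : Nat) : Int) := by
    exact_mod_cast PySem.Int.floordiv_natCast arr.length 2
  rw [aRound, h2, foldl_aStep_length]
  simp [PySem.List.length_pyRange_one]
  omega
-- ===== PORT B =====
-- recursive build(lst): lst[0] at length ≤ 1, else recurse on the freshly built next round
def bBuild (lst : List String) : String :=
  if lst.length ≤ 1 then PySem.List.pyGetD lst 0 ""
  else
    let N : Int := (lst.length : Int)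
    let nxt := (PySem.List.pyRange 0 (PySem.Int.floordiv N 2) 1).map
      (fun i => "(" ++ PySem.List.pyGetD lst i "" ++ "," ++ PySem.List.pyGetD lst (N - 1 - i) "" ++ ")")
    let nxt := if PySem.Int.mod N 2 == 1
      then nxt ++ [PySem.List.pyGetD lst (PySem.Int.floordiv N 2) ""] else nxt
    bBuild nxt
termination_by lst.length
decreasing_by
  rename_i h
  have h2 : PySem.Int.floordiv ((lst.length : Nat) : Int) 2 = ((lst.length / 2 : Nat) : Int) := by
    exact_mod_cast PySem.Int.floordiv_natCast lst.length 2
  have h3 : PySem.Int.mod ((lst.length : Nat) : Int) 2 = ((lst.length % 2 : Nat) : Int) := by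
    exact_mod_cast PySem.Int.mod_natCast lst.length 2
  split
  · rename_i hodd
    rw [h3] at hodd
    have h4 : lst.length % 2 = 1 := by exact_mod_cast beq_iff_eq.mp hodd
    simp only [h2, List.length_append, List.length_map, PySem.List.length_pyRange_one,
      List.length_cons, List.length_nil, Int.sub_zero, Int.toNat_natCast]
    omega
  · simp only [h2, List.length_map, PySem.List.length_pyRange_one, Int.sub_zero,
      Int.toNat_natCast]
    omega

-- 'while len(arr) > 1: …' of A
def aLoop (arr : List String) : List String :=
  if arr.length > 1 then aLoop (aRound arr) else arr
termination_by arr.length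
decreasing_by
  simp only [aRound_length]; omega

-- arr[0]; Pre_ guarantees the list is nonempty (Python raises IndexError for n < 1)
def findContestMatch (n : Int) : String :=
  PySem.List.pyGetD (aLoop ((PySem.List.pyRange 1 (n + 1) 1).map PySem.Int.toStr)) 0 ""

def findContestMatch_alt (n : Int) : String :=
  bBuild ((PySem.List.pyRange 1 (n + 1) 1).map PySem.Int.toStr)

-- ===== PRECONDITION & SPEC =====
-- Pre_ excludes exactly n < 1, where Python A raises IndexError on arr[0] of the empty round list.
def Pre_findContestMatch (n : Int) : Prop := 1 ≤ n
instance (n : Int) : Decidable (Pre_findContestMatch n) := by unfold Pre_findContestMatch; infer_instance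
def pvWitness_findContestMatch : Int := 6

def Spec_findContestMatch (n : Int) (out : String) : Prop := out = findContestMatch_alt n
instance (n : Int) (out : String) : Decidable (Spec_findContestMatch n out) := by unfold Spec_findContestMatch; infer_instance

-- ===== CLAIM (what is proved, stated in full; the proofs are below) =====
def Claim_equal_findContestMatch : Prop := ∀ (n : Int), Dom_findContestMatch n → Pre_findContestMatch n → Spec_findContestMatch n (findContestMatch n)

-- ===== LEMMAS AND PROOFS =====
def pairF (l : List String) (k : Nat) : String :=
  "(" ++ l.getD k "" ++ "," ++ l.getD (l.length - 1 - k) "" ++ ")"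

theorem aStep_fold_getElem? (l : List String) (k : Nat) :
    2 * k ≤ l.length → ∀ j : Nat,
    ((PySem.List.pyRange 0 (k : Int) 1).foldl (aStep (l.length : Int)) l)[j]? =
      (if j < k then some (pairF l j)
       else if j < l.length - k then l[j]? else none) := by
  induction k with
  | zero =>
    intro _ j
    simp [PySem.List.pyRange_one_eq_nil]
  | succ k ih =>
    intro hk j
    have hk' : 2 * k ≤ l.length := by omega
    have hlen : ((PySem.List.pyRange 0 (k : Int) 1).foldl (aStep (l.length : Int)) l).length
        = l.length - k := by
      rw [foldl_aStep_length]
      simp [PySem.List.length_pyRange_one]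
    set S := (PySem.List.pyRange 0 (k : Int) 1).foldl (aStep (l.length : Int)) l with hS
    have hstep : (PySem.List.pyRange 0 ((k+1 : Nat) : Int) 1).foldl (aStep (l.length : Int)) l
        = aStep (l.length : Int) S (k : Int) := by
      have hc : ((k+1 : Nat) : Int) = (k : Int) + 1 := by push_cast; ring
      rw [hc, PySem.List.pyRange_one_succ_right (by positivity)]
      simp only [List.foldl_append, List.foldl_cons, List.foldl_nil]
      rfl
    have hgk : PySem.List.pyGetD S (k : Int) "" = l.getD k "" := by
      rw [PySem.List.pyGetD_natCast, List.getD_eq_getElem?_getD, ih hk' k]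
      rw [if_neg (by omega), if_pos (by omega), ← List.getD_eq_getElem?_getD]
    have hcast : ((l.length : Int) - (k : Int) - 1) = ((l.length - k - 1 : Nat) : Int) := by omega
    have hgl : PySem.List.pyGetD S ((l.length : Int) - (k : Int) - 1) "" = l.getD (l.length - 1 - k) "" := by
      rw [hcast, PySem.List.pyGetD_natCast, List.getD_eq_getElem?_getD, ih hk' (l.length - k - 1)]
      rw [if_neg (by omega), if_pos (by omega), ← List.getD_eq_getElem?_getD]
      congr 1; omega
    rw [hstep, aStep, hgk, hgl, PySem.List.pySetD_natCast]
    rw [List.getElem?_dropLast, List.getElem?_set]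
    simp only [List.length_set, hlen]
    by_cases h1 : j < k
    · rw [if_pos (by omega), if_neg (by omega), ih hk' j, if_pos h1, if_pos (by omega)]
    · by_cases h2 : j = k
      · subst h2
        rw [if_pos (by omega), if_pos rfl, if_pos (by omega), if_pos (by omega)]
        rfl
      · by_cases h3 : j < l.length - (k+1)
        · rw [if_pos (by omega), if_neg (by omega), ih hk' j, if_neg h1, if_pos (by omega),
            if_neg (by omega), if_pos h3]
        · rw [if_neg (by omega), if_neg (by omega), if_neg (by omega)]

theorem aRound_getElem? (l : List String) (j : Nat) :
    (aRound l)[j]? =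
      (if j < l.length / 2 then some (pairF l j)
       else if j < l.length - l.length / 2 then l[j]? else none) := by
  have h2 : PySem.Int.floordiv ((l.length : Nat) : Int) 2 = ((l.length / 2 : Nat) : Int) := by
    exact_mod_cast PySem.Int.floordiv_natCast l.length 2
  rw [aRound, h2, aStep_fold_getElem? l (l.length / 2) (by omega) j]

theorem bRound_eq_aRound (l : List String) :
    (if (PySem.Int.mod (l.length : Int) 2 == 1) = true
     then ((PySem.List.pyRange 0 (PySem.Int.floordiv (l.length : Int) 2) 1).map
            (fun i => "(" ++ PySem.List.pyGetD l i "" ++ "," ++ PySem.List.pyGetD l ((l.length : Int) - 1 - i) "" ++ ")"))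
          ++ [PySem.List.pyGetD l (PySem.Int.floordiv (l.length : Int) 2) ""]
     else ((PySem.List.pyRange 0 (PySem.Int.floordiv (l.length : Int) 2) 1).map
            (fun i => "(" ++ PySem.List.pyGetD l i "" ++ "," ++ PySem.List.pyGetD l ((l.length : Int) - 1 - i) "" ++ ")")))
    = aRound l := by
  have h2 : PySem.Int.floordiv ((l.length : Nat) : Int) 2 = ((l.length / 2 : Nat) : Int) := by
    exact_mod_cast PySem.Int.floordiv_natCast l.length 2
  have h3 : PySem.Int.mod ((l.length : Nat) : Int) 2 = ((l.length % 2 : Nat) : Int) := by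
    exact_mod_cast PySem.Int.mod_natCast l.length 2
  have hmapj : ∀ j : Nat, ((PySem.List.pyRange 0 (PySem.Int.floordiv (l.length : Int) 2) 1).map
      (fun i => "(" ++ PySem.List.pyGetD l i "" ++ "," ++ PySem.List.pyGetD l ((l.length : Int) - 1 - i) "" ++ ")"))[j]?
      = if j < l.length / 2 then some (pairF l j) else none := by
    intro j
    rw [h2, PySem.List.pyRange_zero_nat, List.map_map, List.getElem?_map]
    by_cases hj : j < l.length / 2
    · rw [List.getElem?_range hj, if_pos hj]
      simp only [Option.map_some, Function.comp_apply]
      have hc : ((l.length : Int) - 1 - (j : Int)) = ((l.length - 1 - j : Nat) : Int) := by omega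
      rw [hc, PySem.List.pyGetD_natCast, PySem.List.pyGetD_natCast]
      rfl
    · rw [List.getElem?_eq_none (by simp [List.length_range]; omega), if_neg hj]
      rfl
  have hlenmap : ((PySem.List.pyRange 0 (PySem.Int.floordiv (l.length : Int) 2) 1).map
      (fun i => "(" ++ PySem.List.pyGetD l i "" ++ "," ++ PySem.List.pyGetD l ((l.length : Int) - 1 - i) "" ++ ")")).length
      = l.length / 2 := by
    rw [h2]
    simp [PySem.List.length_pyRange_one]
    omega
  apply List.ext_getElem?
  intro j
  rw [aRound_getElem?]
  by_cases hodd : l.length % 2 = 1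
  · rw [if_pos (by rw [h3, hodd]; rfl)]
    by_cases hj : j < l.length / 2
    · rw [List.getElem?_append_left (by omega), hmapj j, if_pos hj, if_pos hj]
    · by_cases hj2 : j = l.length / 2
      · subst hj2
        rw [List.getElem?_append_right (by omega), hlenmap]
        simp only [Nat.sub_self, List.getElem?_cons_zero]
        rw [if_neg hj, if_pos (by omega), h2, PySem.List.pyGetD_natCast,
          List.getD_eq_getElem?_getD]
        have : l.length / 2 < l.length := by omega
        rw [List.getElem?_eq_getElem this]
        rfl
      · rw [List.getElem?_append_right (by omega), hlenmap,
          if_neg hj, if_neg (by omega)]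
        have : 1 ≤ j - l.length / 2 := by omega
        rcases Nat.exists_eq_add_of_le this with ⟨t, ht⟩
        rw [ht]
        simp
  · rw [if_neg (by rw [h3]; simp; omega)]
    rw [hmapj j]
    by_cases hj : j < l.length / 2
    · rw [if_pos hj, if_pos hj]
    · rw [if_neg hj, if_neg hj, if_neg (by omega)]

theorem loop_le_one (l : List String) (h : ¬ 1 < l.length) : aLoop l = l := by
  rw [aLoop, if_neg h]

theorem loop_eq_build_aux : ∀ (n : Nat) (l : List String), l.length ≤ n →
    PySem.List.pyGetD (aLoop l) 0 "" = bBuild l := by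
  intro n
  induction n with
  | zero =>
    intro l hl
    rw [loop_le_one l (by omega), bBuild, if_pos (by omega)]
  | succ n ih =>
    intro l hl
    by_cases h : 1 < l.length
    · rw [aLoop, if_pos h]
      conv_rhs => rw [bBuild]
      rw [if_neg (by omega)]
      simp only []
      rw [bRound_eq_aRound l]
      exact ih (aRound l) (by have := aRound_length l; omega)
    · rw [loop_le_one l h, bBuild, if_pos (by omega)]

theorem loop_eq_build (l : List String) :
    PySem.List.pyGetD (aLoop l) 0 "" = bBuild l :=
  loop_eq_build_aux l.length l le_rfl

-- ===== VERDICT (by name: the statement is the Claim_ definition above) =====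
theorem findContestMatch_spec : Claim_equal_findContestMatch := by
  intro n _ _
  unfold Spec_findContestMatch findContestMatch findContestMatch_alt
  exact loop_eq_build _
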